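-- pv_equiv track=rewrite | github.com/Megartron/Farning | Python/Jianqi Chen 13 3 24.py | Kann_gewinnen
-- ===== SOURCE A (Python) =====
-- def Kann_gewinnen(reihe):
--     gleich = 0
--     leer = 0
--     element = None
--     for i in reihe:
--         if i == "":
--             leer += 1
--         elif element == None:
--         	element = "X" if i == "X" else "O"
--         elif i == element:
--             gleich += 1
--     if gleich != 0 and leer != 0:
--           return True
--     else:
--          return False
-- ===== SOURCE B (Python) =====
-- def _gleich(cells):
--     # count of cells matching the normalized first non-empty marker,
--     # among the cells after that first non-empty one
--     if not cells:
--         return 0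
--     first, rest = cells[0], cells[1:]
--     if first == "":
--         return _gleich(rest)
--     element = "X" if first == "X" else "O"
--     return rest.count(element)
--
-- def Kann_gewinnen(reihe):
--     leer = reihe.count("")
--     return _gleich(reihe) != 0 and leer != 0
-- ===== Notes on version B (the rewrite author's own statement) =====
-- stated objective: simpler
-- what changed: Replaces A's single loop threading three mutable counters and an Optional marker with a count() for the empties plus a small recursion that finds the first non-empty cell and counts its normalized marker in the remaining suffix with count().
import Mathlib
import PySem

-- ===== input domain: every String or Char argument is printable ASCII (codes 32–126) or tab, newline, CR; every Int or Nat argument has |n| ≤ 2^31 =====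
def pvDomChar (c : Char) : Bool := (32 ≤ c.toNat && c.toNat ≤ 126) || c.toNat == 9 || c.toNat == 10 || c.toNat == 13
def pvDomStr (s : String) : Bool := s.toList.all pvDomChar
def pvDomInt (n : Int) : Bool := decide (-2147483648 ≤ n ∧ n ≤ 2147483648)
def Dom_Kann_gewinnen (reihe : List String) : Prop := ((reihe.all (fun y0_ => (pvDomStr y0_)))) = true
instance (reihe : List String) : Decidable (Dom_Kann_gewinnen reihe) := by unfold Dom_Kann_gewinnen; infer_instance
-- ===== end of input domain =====

-- B replaces A's single loop with three mutable counters and an Optional marker by a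
-- count() of the empties plus a recursion locating the first non-empty cell (simpler).


-- ===== PORT A =====
-- A's for-loop threading the state (gleich, leer, element); returns the final (gleich, leer)
def pvLoopA (gleich leer : Int) (element : Option String) : List String → Int × Int
  | [] => (gleich, leer)
  | i :: rest =>
    if i == "" then pvLoopA gleich (leer + 1) element rest
    else match element with
      | none => pvLoopA gleich leer (some (if i == "X" then "X" else "O")) rest
      | some e => if i == e then pvLoopA (gleich + 1) leer (some e) rest
                  else pvLoopA gleich leer (some e) rest

def Kann_gewinnen (reihe : List String) : Bool :=
  let r := pvLoopA 0 0 none reihe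
  if r.1 ≠ 0 ∧ r.2 ≠ 0 then true else false

-- ===== PORT B =====
-- B's helper _gleich: first non-empty cell fixes the marker, count it in the rest
def pvGleich : List String → Int
  | [] => 0
  | first :: rest =>
    if first == "" then pvGleich rest
    else PySem.List.count rest (if first == "X" then "X" else "O")

def Kann_gewinnen_alt (reihe : List String) : Bool :=
  let leer := PySem.List.count reihe ""
  pvGleich reihe != 0 && leer != 0

-- ===== PRECONDITION & SPEC =====
def Spec_Kann_gewinnen (reihe : List String) (out : Bool) : Prop := out = Kann_gewinnen_alt reihe
instance (reihe : List String) (out : Bool) : Decidable (Spec_Kann_gewinnen reihe out) := by unfold Spec_Kann_gewinnen; infer_instance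

-- ===== CLAIM (what is proved, stated in full; the proofs are below) =====
def Claim_equal_Kann_gewinnen : Prop := ∀ (reihe : List String), Dom_Kann_gewinnen reihe → Spec_Kann_gewinnen reihe (Kann_gewinnen reihe)

-- ===== LEMMAS AND PROOFS =====

-- once the marker e (≠ "") is fixed, A's loop just adds the counts of e and of ""
theorem pvLoopA_some (e : String) (he : e ≠ "") :
    ∀ (xs : List String) (g l : Int),
      pvLoopA g l (some e) xs = (g + PySem.List.count xs e, l + PySem.List.count xs "") := by
  intro xs
  induction xs with
  | nil => intro g l; simp [pvLoopA, PySem.List.count]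
  | cons i rest ih =>
    intro g l
    simp only [pvLoopA, ih, PySem.List.count, List.count_cons]
    by_cases hi : i = ""
    · subst hi
      simp [Prod.ext_iff, Ne.symm he]
      omega
    · by_cases hie : i = e
      · subst hie
        simp [Prod.ext_iff, hi]
        omega
      · simp [hi, hie]

-- before the marker is fixed, A's loop computes pvGleich plus the empty count
theorem pvLoopA_none :
    ∀ (xs : List String) (g l : Int),
      pvLoopA g l none xs = (g + pvGleich xs, l + PySem.List.count xs "") := by
  intro xs
  induction xs with
  | nil => intro g l; simp [pvLoopA, pvGleich, PySem.List.count]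
  | cons i rest ih =>
    intro g l
    by_cases hi : i = ""
    · subst hi
      simp only [pvLoopA, pvGleich, ih, PySem.List.count, List.count_cons]
      simp [Prod.ext_iff]
      omega
    · have he : (if i = "X" then "X" else "O") ≠ "" := by
        by_cases h : i = "X" <;> simp [h]
      simp only [pvLoopA, pvGleich, beq_iff_eq, if_neg hi,
        pvLoopA_some _ he rest g l, PySem.List.count, List.count_cons]
      simp

-- ===== VERDICT (by name: the statement is the Claim_ definition above) =====
theorem Kann_gewinnen_spec : Claim_equal_Kann_gewinnen := by
  intro reihe _
  unfold Spec_Kann_gewinnen Kann_gewinnen Kann_gewinnen_alt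
  rw [pvLoopA_none]
  simp
  tauto
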